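-- pv_equiv track=rewrite | github.com/AI-project-Alogrithms/AI-project-Algorithms | algorithms/Week_05/softeer_7367_백트레킹_jiho.py | comb_max
-- ===== SOURCE A (Python) =====
-- def comb_max(arr):
--     max_ending_here = max_so_far = arr[0]
--     max_sum = [0]*len(arr)
--     max_sum[0] = arr[0]
--     for i in range(1,len(arr)):
--         max_ending_here = max(arr[i], max_ending_here + arr[i])
--         max_so_far = max(max_so_far, max_ending_here)
--         max_sum[i] = max_so_far
--     return max_sum
-- ===== SOURCE B (Python) =====
-- def comb_max(arr):
--     # Naive nested scan: best non-empty subarray sum within arr[0:i+1] for each i.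
--     res = []
--     for i in range(len(arr)):
--         e = max(sum(arr[j:i + 1]) for j in range(i + 1))
--         res.append(e if not res else max(res[-1], e))
--     return res
-- ===== Notes on version B (the rewrite author's own statement) =====
-- stated objective: alternative
-- what changed: Replaces Kadane's O(n) running-recurrence with a naive nested scan that, for each prefix end i, takes the maximum of all non-empty subarray sums ending at i via explicit slices, combined with the running best.
-- outside the precondition, e.g. on comb_max([]): A raises IndexError, B returns []
-- crash fix: On the empty list A raises IndexError (first-element access); B returns the empty list. — e.g. on comb_max([]): A raises IndexError, B returns []
import Mathlib
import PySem

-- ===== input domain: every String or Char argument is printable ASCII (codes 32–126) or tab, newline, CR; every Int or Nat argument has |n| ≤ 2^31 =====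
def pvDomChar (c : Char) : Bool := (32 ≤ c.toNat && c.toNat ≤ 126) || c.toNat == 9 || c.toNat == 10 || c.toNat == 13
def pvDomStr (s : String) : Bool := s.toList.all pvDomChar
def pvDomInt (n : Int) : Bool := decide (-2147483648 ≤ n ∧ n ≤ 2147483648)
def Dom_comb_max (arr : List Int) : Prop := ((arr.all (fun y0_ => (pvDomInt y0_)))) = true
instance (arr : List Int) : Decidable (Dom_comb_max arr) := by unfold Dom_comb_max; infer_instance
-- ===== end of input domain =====

-- B is a structurally different (naive nested-scan, per-prefix maximum over explicit slices)
-- re-implementation of A's Kadane recurrence; 'alternative' objective, no speed claim.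
-- A raises IndexError on the empty list (first-element access); B returns [] there (Raises_ block below).

-- ===== PORT A =====
-- the first-element access raises IndexError on []; Pre_ excludes the empty list, so the default 0 is never used.
-- max_sum = [0]*len(arr) is written at indices 0,1,…,len-1 in order: modelled by appending.
def comb_max (arr : List Int) : List Int :=
  let a0 := PySem.List.pyGetD arr 0 0
  let r := (PySem.List.pyRange 1 (arr.length : Int) 1).foldl
      (fun (st : Int × Int × List Int) i =>
        let x := PySem.List.pyGetD arr i 0  -- i always in range
        let meh := max x (st.1 + x)
        let msf := max st.2.1 meh
        (meh, msf, st.2.2 ++ [msf]))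
      (a0, a0, [a0])
  r.2.2

-- ===== PORT B =====
-- e = max(sum(arr[j:i+1]) for j in range(i+1)): build the candidate list, fold max over it
-- (the list is nonempty for i ≥ 0, so the [] branch is unreachable).
def combEndMax (arr : List Int) (i : Int) : Int :=
  match (PySem.List.pyRange 0 (i + 1) 1).map
      (fun j => (PySem.List.slice arr (some j) (some (i + 1))).sum) with
  | [] => 0
  | v :: vs => vs.foldl max v

def comb_max_alt (arr : List Int) : List Int :=
  (PySem.List.pyRange 0 (arr.length : Int) 1).foldl
    (fun res i =>
      let e := combEndMax arr i
      res ++ [match res.getLast? with  -- 'e if not res else max(res[-1], e)'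
              | none => e
              | some b => max b e])
    []

-- ===== PRECONDITION & SPEC =====
-- Pre_ excludes only the empty list, on which A raises IndexError at its first-element access.
def Pre_comb_max (arr : List Int) : Prop := arr ≠ []
instance (arr : List Int) : Decidable (Pre_comb_max arr) := by unfold Pre_comb_max; infer_instance
def pvWitness_comb_max : List Int := [2, -5, 3, 1]

-- On the empty list A raises IndexError (first-element access); B returns [].
def Raises_comb_max (arr : List Int) : Prop := arr = []
instance (arr : List Int) : Decidable (Raises_comb_max arr) := by unfold Raises_comb_max; infer_instance
def pvRaiseWitness_comb_max : List Int := []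
def pvRaiseWitnessOut_comb_max : List Int := []

def Spec_comb_max (arr : List Int) (out : List Int) : Prop := out = comb_max_alt arr
instance (arr : List Int) (out : List Int) : Decidable (Spec_comb_max arr out) := by unfold Spec_comb_max; infer_instance

-- ===== CLAIM (what is proved, stated in full; the proofs are below) =====
def Claim_equal_comb_max : Prop := ∀ (arr : List Int), Dom_comb_max arr → Pre_comb_max arr → Spec_comb_max arr (comb_max arr)
def Claim_raises_comb_max : Prop := (∀ (arr : List Int), Dom_comb_max arr → Raises_comb_max arr → ¬ Pre_comb_max arr) ∧ (Dom_comb_max (pvRaiseWitness_comb_max) ∧ Raises_comb_max (pvRaiseWitness_comb_max) ∧ comb_max_alt (pvRaiseWitness_comb_max) = pvRaiseWitnessOut_comb_max)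

-- ===== LEMMAS AND PROOFS =====

-- fmax l = foldl max over a nonempty list (the shape both ports reduce to)
def fmax (l : List Int) : Int :=
  match l with
  | [] => 0
  | v :: vs => vs.foldl max v

-- candidate sums in Nat form: sums of arr[j:i+1] for j = 0..i
def cand (arr : List Int) (i : Nat) : List Int :=
  (List.range (i + 1)).map (fun j => ((arr.drop j).take (i + 1 - j)).sum)

-- E/M: Kadane's two running values, as functions of the index
def Efn (arr : List Int) (i : Nat) : Int := fmax (cand arr i)
def Mfn (arr : List Int) : Nat → Int
  | 0 => Efn arr 0
  | i + 1 => max (Mfn arr i) (Efn arr (i + 1))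

theorem fmax_map_add (v a : Int) (vs : List Int) :
    (vs.map (· + a)).foldl max (v + a) = vs.foldl max v + a := by
  induction vs generalizing v with
  | nil => simp
  | cons x xs ih => simpa [max_add_add_right] using ih (max v x)

theorem cand_succ (arr : List Int) (i : Nat) (h : i + 1 < arr.length) :
    cand arr (i + 1) = (cand arr i).map (· + arr[i + 1]) ++ [arr[i + 1]] := by
  unfold cand
  rw [List.range_succ, List.map_append, List.map_map]
  congr 1
  · apply List.map_congr_left
    intro j hj
    have hji : j ≤ i := by simpa [Nat.lt_succ_iff] using List.mem_range.mp hj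
    have h1 : i + 1 + 1 - j = (i + 1 - j) + 1 := by omega
    have h2 : (arr.drop j)[i + 1 - j]? = some arr[i + 1] := by
      rw [List.getElem?_drop]
      have : j + (i + 1 - j) = i + 1 := by omega
      rw [this]
      exact List.getElem?_eq_getElem h
    simp [h1, List.take_add_one, h2]
  · have h1 : i + 1 + 1 - (i + 1) = 1 := by omega
    have h2 : (arr.drop (i + 1)).take 1 = [arr[i + 1]] := by
      have hlt : i + 1 < arr.length := h
      rw [List.take_one]
      simp [List.head?_drop, List.getElem?_eq_getElem hlt]
    simp [h1, h2]

theorem cand_zero (arr : List Int) (h : 0 < arr.length) :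
    cand arr 0 = [arr[0]] := by
  unfold cand
  have : arr.take 1 = [arr[0]] := by
    rw [List.take_one]; simp [List.head?_eq_getElem?, List.getElem?_eq_getElem h]
  simp [this]

theorem Efn_zero (arr : List Int) (h : 0 < arr.length) : Efn arr 0 = arr[0] := by
  simp [Efn, cand_zero arr h, fmax]

theorem Efn_succ (arr : List Int) (i : Nat) (h : i + 1 < arr.length) :
    Efn arr (i + 1) = max (Efn arr i + arr[i + 1]) arr[i + 1] := by
  unfold Efn
  rw [cand_succ arr i h]
  have hc : cand arr i ≠ [] := by simp [cand]
  obtain ⟨v, vs, hvv⟩ := List.exists_cons_of_ne_nil hc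
  simp [hvv, fmax, fmax_map_add]

-- bridge: the B port's combEndMax at a Nat index is Efn
theorem combEndMax_natCast (arr : List Int) (i : Nat) :
    combEndMax arr (i : Int) = Efn arr i := by
  have hr : (PySem.List.pyRange 0 ((i : Int) + 1) 1).map
      (fun j => (PySem.List.slice arr (some j) (some ((i : Int) + 1))).sum) = cand arr i := by
    have hcast : ((i : Int) + 1) = ((i + 1 : Nat) : Int) := by push_cast; ring
    rw [hcast, PySem.List.pyRange_zero_natCast, List.map_map]
    unfold cand
    apply List.map_congr_left
    intro j _
    rw [Function.comp_apply, PySem.List.slice_natCast]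
  unfold combEndMax Efn
  rw [hr]
  rfl

-- A-side invariant: the fold over range(1, k) lands on (Efn (k-1), Mfn (k-1), map Mfn (range k))
theorem A_invariant (arr : List Int) (h0 : 0 < arr.length) (k : Nat)
    (hk1 : 1 ≤ k) (hkn : k ≤ arr.length) :
    (PySem.List.pyRange 1 (k : Int) 1).foldl
      (fun (st : Int × Int × List Int) i =>
        let x := PySem.List.pyGetD arr i 0
        let meh := max x (st.1 + x)
        let msf := max st.2.1 meh
        (meh, msf, st.2.2 ++ [msf]))
      (arr[0], arr[0], [arr[0]]) =
    (Efn arr (k - 1), Mfn arr (k - 1), (List.range k).map (Mfn arr)) := by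
  induction k with
  | zero => omega
  | succ m ih =>
    by_cases hm : m = 0
    · subst hm
      simp [Efn_zero arr h0, Mfn, List.range_succ]
    · have hm1 : 1 ≤ m := Nat.one_le_iff_ne_zero.mpr hm
      have hmn : m ≤ arr.length := by omega
      have hmlt : m < arr.length := by omega
      have hsplit : PySem.List.pyRange 1 ((m + 1 : Nat) : Int) 1 =
          PySem.List.pyRange 1 ((m : Nat) : Int) 1 ++ [(m : Int)] := by
        have : ((m + 1 : Nat) : Int) = ((m : Nat) : Int) + 1 := by push_cast; ring
        rw [this]
        exact PySem.List.pyRange_one_succ_right (by exact_mod_cast hm1)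
      rw [hsplit, List.foldl_append, ih hm1 hmn]
      have hget : PySem.List.pyGetD arr ((m : Nat) : Int) 0 = arr[m] := by
        rw [PySem.List.pyGetD_natCast]
        exact List.getD_eq_getElem arr 0 hmlt
      have hE : Efn arr m = max arr[m] (Efn arr (m - 1) + arr[m]) := by
        obtain ⟨j, rfl⟩ : ∃ j, m = j + 1 := ⟨m - 1, by omega⟩
        rw [Efn_succ arr j hmlt]
        simp [max_comm]
      have hM : Mfn arr m = max (Mfn arr (m - 1)) (Efn arr m) := by
        obtain ⟨j, rfl⟩ : ∃ j, m = j + 1 := ⟨m - 1, by omega⟩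
        simp [Mfn]
      simp only [List.foldl_cons, List.foldl_nil, hget]
      rw [← hE]
      refine Prod.ext (by simp) (Prod.ext (by simp [hM]) ?_)
      simp [List.range_succ, hM]

-- B-side invariant: the fold over range(0, k) builds map Mfn (range k)
theorem B_invariant (arr : List Int) (k : Nat) :
    (PySem.List.pyRange 0 (k : Int) 1).foldl
      (fun res i =>
        let e := combEndMax arr i
        res ++ [match res.getLast? with
                | none => e
                | some b => max b e])
      [] = (List.range k).map (Mfn arr) := by
  induction k with
  | zero =>
    simp
  | succ m ih =>
    have hsplit : PySem.List.pyRange 0 ((m + 1 : Nat) : Int) 1 =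
        PySem.List.pyRange 0 ((m : Nat) : Int) 1 ++ [(m : Int)] := by
      have : ((m + 1 : Nat) : Int) = ((m : Nat) : Int) + 1 := by push_cast; ring
      rw [this]
      exact PySem.List.pyRange_one_succ_right (by positivity)
    rw [hsplit, List.foldl_append, ih]
    simp only [List.foldl_cons, List.foldl_nil, combEndMax_natCast]
    cases m with
    | zero => simp [Mfn, List.range_succ]
    | succ j =>
      have hlast : ((List.range (j + 1)).map (Mfn arr)).getLast? = some (Mfn arr j) := by
        rw [List.range_succ]
        simp
      rw [hlast]
      simp [List.range_succ, Mfn]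

-- ===== VERDICT (by name: the statement is the Claim_ definition above) =====
theorem comb_max_spec : Claim_equal_comb_max := by
  intro arr _ hpre
  have h0 : 0 < arr.length := List.length_pos_iff.mpr hpre
  unfold Spec_comb_max comb_max comb_max_alt
  have ha0 : PySem.List.pyGetD arr 0 0 = arr[0] := by
    rw [PySem.List.pyGetD_zero]
    exact List.getD_eq_getElem arr 0 h0
  simp only [ha0]
  rw [A_invariant arr h0 arr.length h0 (le_refl _), B_invariant arr arr.length]

@[simp] theorem comb_max_raises : Claim_raises_comb_max := by
  unfold Claim_raises_comb_max
  exact ⟨fun arr _ hr => by simp [Pre_comb_max, Raises_comb_max] at *; exact hr, by decide⟩
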